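-- pv_equiv track=rewrite | github.com/zwingthomas/Advent-Of-Code | 2023/day15/lens.py | determine_box
-- ===== SOURCE A (Python) =====
-- def determine_box(sequence):
--     current = 0
--     chars = ""
--     for c in sequence:
--         if c == '=' or c == '-':
--             break
--         current += ord(c)
--         current *= 17
--         current %= 256
--         chars += c
--     return current, chars
-- ===== SOURCE B (Python) =====
-- def determine_box(sequence):
--     i = 0
--     n = len(sequence)
--     while i < n and sequence[i] != '=' and sequence[i] != '-':
--         i += 1
--     label = sequence[:i]
--     # hash = sum(ord(c) * 17**(len(label)-k)) mod 256, computed back-to-front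
--     # with a running power of 17 (mod 256)
--     h, p = 0, 1
--     for ch in reversed(label):
--         p = p * 17 % 256
--         h = (h + ord(ch) * p) % 256
--     return h, label
-- ===== Notes on version B (the rewrite author's own statement) =====
-- stated objective: alternative
-- what changed: A builds the label and the hash together in one forward break-on-delimiter loop with an affine accumulator; B first cuts the label with an index scan, then hashes it back-to-front as the weighted sum of ord(c) times a running power of 17 mod 256.
import Mathlib
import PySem

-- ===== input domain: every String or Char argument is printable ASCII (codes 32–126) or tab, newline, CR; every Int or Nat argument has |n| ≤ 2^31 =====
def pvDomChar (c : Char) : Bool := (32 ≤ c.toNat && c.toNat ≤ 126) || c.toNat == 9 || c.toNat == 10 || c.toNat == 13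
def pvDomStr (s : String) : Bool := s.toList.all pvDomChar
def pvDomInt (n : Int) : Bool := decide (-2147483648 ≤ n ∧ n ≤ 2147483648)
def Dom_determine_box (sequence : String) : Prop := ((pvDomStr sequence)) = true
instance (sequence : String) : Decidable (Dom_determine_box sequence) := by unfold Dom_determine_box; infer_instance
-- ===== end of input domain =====

-- B cuts the label with an index scan and hashes it BACK-TO-FRONT as a weighted sum Σ ord(c)·17^(n−k) mod 256 with a running power of 17, instead of A's forward affine fold interleaved with label building (alternative algorithm, same cost).


-- ===== PORT A =====
-- the for-loop with break, carrying (current, chars)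
def determine_boxGo (current : Int) (chars : List Char) : List Char → Int × List Char
  | [] => (current, chars)
  | c :: rest =>
    if c = '=' ∨ c = '-' then (current, chars)
    else determine_boxGo (PySem.Int.mod ((current + (c.toNat : Int)) * 17) 256) (chars ++ [c]) rest

def determine_box (sequence : String) : Int × String :=
  let r := determine_boxGo 0 [] sequence.toList
  (r.1, String.ofList r.2)

-- ===== PORT B =====
-- the while-loop scanning for the first '=' or '-' (i stops at the cut index)
def cutIdx : List Char → Nat
  | [] => 0
  | c :: rest => if c = '=' ∨ c = '-' then 0 else cutIdx rest + 1

-- the reversed for-loop: running power of 17 mod 256 and weighted sum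
def revHashGo (h p : Int) : List Char → Int × Int
  | [] => (h, p)
  | c :: rest =>
    let p' := PySem.Int.mod (p * 17) 256
    revHashGo (PySem.Int.mod (h + (c.toNat : Int) * p') 256) p' rest

def determine_box_alt (sequence : String) : Int × String :=
  let label := sequence.toList.take (cutIdx sequence.toList)
  ((revHashGo 0 1 label.reverse).1, String.ofList label)

-- ===== PRECONDITION & SPEC =====
def Spec_determine_box (sequence : String) (out : Int × String) : Prop := out = determine_box_alt sequence
instance (sequence : String) (out : Int × String) : Decidable (Spec_determine_box sequence out) := by unfold Spec_determine_box; infer_instance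

-- ===== CLAIM (what is proved, stated in full; the proofs are below) =====
def Claim_equal_determine_box : Prop := ∀ (sequence : String), Dom_determine_box sequence → Spec_determine_box sequence (determine_box sequence)

-- ===== LEMMAS AND PROOFS =====

-- weighted sum of the label, front order: S (c::l) = c·17^(|l|+1) + S l
def wsum : List Char → Int
  | [] => 0
  | c :: l => (c.toNat : Int) * 17 ^ (l.length + 1) + wsum l

-- weighted sum, reverse order: T (c::m) = c·17 + 17·T m
def rsum : List Char → Int
  | [] => 0
  | c :: m => (c.toNat : Int) * 17 + 17 * rsum m

theorem pymod256 (a : Int) : PySem.Int.mod a 256 = a % 256 :=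
  PySem.Int.mod_eq_emod_of_pos (by norm_num)

theorem rsum_append (m : List Char) (c : Char) :
    rsum (m ++ [c]) = rsum m + (c.toNat : Int) * 17 ^ (m.length + 1) := by
  induction m with
  | nil => simp [rsum]
  | cons d m ih => simp [rsum, ih]; ring

theorem wsum_eq_rsum_reverse (l : List Char) : wsum l = rsum l.reverse := by
  induction l with
  | nil => rfl
  | cons c l ih => simp [wsum, rsum_append, ih]; ring

-- A's fold ≡ a·17^|l| + wsum l  (mod 256), for lists without delimiter handled by the caller
theorem goA_modeq (l : List Char) : ∀ (a : Int) (chars : List Char),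
    (∀ c ∈ l, ¬(c = '=' ∨ c = '-')) →
    (determine_boxGo a chars l).1 ≡ a * 17 ^ l.length + wsum l [ZMOD 256] ∧
    (determine_boxGo a chars l).2 = chars ++ l := by
  induction l with
  | nil =>
    intro a chars _
    refine ⟨?_, by simp [determine_boxGo]⟩
    simp only [determine_boxGo, List.length_nil, pow_zero, mul_one, wsum, add_zero]
    exact Int.ModEq.refl a
  | cons c l ih =>
    intro a chars hnd
    have hc := hnd c (by simp)
    simp only [determine_boxGo, if_neg hc, pymod256]
    obtain ⟨h1, h2⟩ := ih (((a + (c.toNat : Int)) * 17) % 256) (chars ++ [c])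
      (fun d hd => hnd d (by simp [hd]))
    refine ⟨h1.trans ?_, by simp [h2]⟩
    have hm : ((a + (c.toNat : Int)) * 17) % 256 ≡ (a + (c.toNat : Int)) * 17 [ZMOD 256] :=
      Int.emod_emod_of_dvd _ dvd_rfl
    calc ((a + (c.toNat : Int)) * 17) % 256 * 17 ^ l.length + wsum l
        ≡ (a + (c.toNat : Int)) * 17 * 17 ^ l.length + wsum l [ZMOD 256] :=
          (hm.mul_right _).add_right _
      _ = a * 17 ^ (c :: l).length + wsum (c :: l) := by
          simp [wsum, List.length_cons]; ring

-- B's reversed fold ≡ h + p·rsum m  (mod 256)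
theorem goB_modeq (m : List Char) : ∀ (h p : Int),
    (revHashGo h p m).1 ≡ h + p * rsum m [ZMOD 256] := by
  induction m with
  | nil => intro h p; simp [revHashGo, rsum]
  | cons c m ih =>
    intro h p
    simp only [revHashGo]
    have hp : PySem.Int.mod (p * 17) 256 ≡ p * 17 [ZMOD 256] := by
      rw [pymod256]; exact Int.emod_emod_of_dvd _ dvd_rfl
    have hh : PySem.Int.mod (h + (c.toNat : Int) * PySem.Int.mod (p * 17) 256) 256
        ≡ h + (c.toNat : Int) * (p * 17) [ZMOD 256] := by
      rw [pymod256]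
      exact (Int.emod_emod_of_dvd _ dvd_rfl).trans ((hp.mul_left _).add_left _)
    refine (ih _ _).trans ?_
    calc PySem.Int.mod (h + (c.toNat : Int) * PySem.Int.mod (p * 17) 256) 256
          + PySem.Int.mod (p * 17) 256 * rsum m
        ≡ (h + (c.toNat : Int) * (p * 17)) + p * 17 * rsum m [ZMOD 256] :=
          hh.add (hp.mul_right _)
      _ = h + p * rsum (c :: m) := by simp [rsum]; ring

-- range of A's fold result when it starts from 0
theorem goA_bounds (l : List Char) : ∀ (a : Int) (chars : List Char),
    0 ≤ a → a < 256 → 0 ≤ (determine_boxGo a chars l).1 ∧ (determine_boxGo a chars l).1 < 256 := by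
  induction l with
  | nil => intro a chars h1 h2; exact ⟨h1, h2⟩
  | cons c l ih =>
    intro a chars h1 h2
    simp only [determine_boxGo]
    split
    · exact ⟨h1, h2⟩
    · exact ih _ _ (by rw [pymod256]; omega) (by rw [pymod256]; omega)

theorem goB_bounds (m : List Char) : ∀ (h p : Int),
    0 ≤ h → h < 256 → 0 ≤ (revHashGo h p m).1 ∧ (revHashGo h p m).1 < 256 := by
  induction m with
  | nil => intro h p h1 h2; exact ⟨h1, h2⟩
  | cons c m ih =>
    intro h p h1 h2
    simp only [revHashGo]
    exact ih _ _ (by rw [pymod256]; omega) (by rw [pymod256]; omega)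

theorem take_cutIdx_no_delim (l : List Char) :
    ∀ c ∈ l.take (cutIdx l), ¬(c = '=' ∨ c = '-') := by
  induction l with
  | nil => simp
  | cons c l ih =>
    by_cases h : c = '=' ∨ c = '-'
    · simp [cutIdx, h]
    · intro d hd
      simp only [cutIdx, if_neg h, List.take_succ_cons, List.mem_cons] at hd
      rcases hd with rfl | hd
      · exact h
      · exact ih d hd

-- A's loop stops exactly at the cut: it equals the fold over the taken prefix
theorem goA_eq_take (l : List Char) : ∀ (a : Int) (chars : List Char),
    determine_boxGo a chars l = determine_boxGo a chars (l.take (cutIdx l)) := by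
  induction l with
  | nil => intro a chars; rfl
  | cons c l ih =>
    intro a chars
    by_cases h : c = '=' ∨ c = '-'
    · simp [determine_boxGo, cutIdx, h]
    · simp [determine_boxGo, cutIdx, h, ih]

-- ===== VERDICT (by name: the statement is the Claim_ definition above) =====
theorem determine_box_spec : Claim_equal_determine_box := by
  intro s _
  show _ = _
  simp only [determine_box, determine_box_alt]
  have hnd := take_cutIdx_no_delim s.toList
  set l := s.toList.take (cutIdx s.toList) with hl
  obtain ⟨hA, hchars⟩ := goA_modeq l 0 [] hnd
  have hB := goB_modeq l.reverse 0 1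
  rw [goA_eq_take s.toList 0 [], ← hl]
  have hA' : (determine_boxGo 0 [] l).1 ≡ wsum l [ZMOD 256] := by simpa using hA
  have hB' : (revHashGo 0 1 l.reverse).1 ≡ rsum l.reverse [ZMOD 256] := by simpa using hB
  have hAB : (determine_boxGo 0 [] l).1 ≡ (revHashGo 0 1 l.reverse).1 [ZMOD 256] :=
    hA'.trans (by rw [wsum_eq_rsum_reverse]; exact hB'.symm)
  obtain ⟨a1, a2⟩ := goA_bounds l 0 [] (by norm_num) (by norm_num)
  obtain ⟨b1, b2⟩ := goB_bounds l.reverse 0 1 (by norm_num) (by norm_num)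
  have h256 : (determine_boxGo 0 [] l).1 % 256 = (revHashGo 0 1 l.reverse).1 % 256 := hAB
  have hv : (determine_boxGo 0 [] l).1 = (revHashGo 0 1 l.reverse).1 := by omega
  simp [hv, hchars]
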